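-- pv_equiv track=rewrite | github.com/jsdavis02/mft_hl7_oasis_components | oasis_fun/delete_segments.py | delete_segments
-- ===== SOURCE A (Python) =====
-- def delete_segments(json_in, seglist):
--
--     deletekeys = list()
--     for (key, value) in json_in.items():
--         if key.startswith(seglist):
--             deletekeys.append(key)
--
--     for key in deletekeys:
--         if key in json_in:
--             del json_in[key]
--
--     return json_in
-- ===== SOURCE B (Python) =====
-- def delete_segments(json_in, seglist):
--     kept = {k: v for k, v in json_in.items() if not k.startswith(seglist)}
--     json_in.clear()
--     json_in.update(kept)
--     return json_in
-- ===== Notes on version B (the rewrite author's own statement) =====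
-- stated objective: simpler
-- what changed: B computes the keys to KEEP in one comprehension and rebuilds the dict in place with clear()+update(), instead of A's two-phase collect-matching-keys-then-delete-one-by-one loop with a per-key membership re-check.
import Mathlib
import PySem

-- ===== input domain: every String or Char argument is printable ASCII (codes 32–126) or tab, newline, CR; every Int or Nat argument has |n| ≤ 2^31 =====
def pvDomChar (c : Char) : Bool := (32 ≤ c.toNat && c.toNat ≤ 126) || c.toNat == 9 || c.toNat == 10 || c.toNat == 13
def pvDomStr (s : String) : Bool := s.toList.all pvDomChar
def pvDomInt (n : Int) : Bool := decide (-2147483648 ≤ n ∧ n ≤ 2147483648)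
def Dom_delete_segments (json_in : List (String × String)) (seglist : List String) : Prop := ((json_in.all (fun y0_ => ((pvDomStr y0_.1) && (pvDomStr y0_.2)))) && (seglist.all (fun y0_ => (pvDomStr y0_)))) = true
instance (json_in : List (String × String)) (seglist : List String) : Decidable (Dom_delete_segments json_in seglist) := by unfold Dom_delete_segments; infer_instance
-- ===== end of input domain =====

-- B keeps the surviving entries in one filtering pass and rebuilds the dict (clear + update),
-- instead of A's collect-matching-keys-then-delete-one-by-one two-phase loops; simpler, same cost.
-- Both Pythons mutate json_in in place and return it; the theorems are about the returned value.

-- ===== PORT A =====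
-- `key.startswith(seglist)` with seglist a tuple of prefixes: true iff key starts with any of them.
def pvStartsAnyA (key : String) (seglist : List String) : Bool :=
  seglist.any (fun p => PySem.Str.startswith key p)

def delete_segments (json_in : List (String × String)) (seglist : List String) : List (String × String) :=
  let d := PySem.Dict.ofList json_in
  let deletekeys : List String :=
    d.items.foldl (fun acc kv => if pvStartsAnyA kv.1 seglist then acc ++ [kv.1] else acc) []
  let d2 := deletekeys.foldl (fun e k => if e.contains k then e.erase k else e) d
  d2.items

-- ===== PORT B =====
def delete_segments_alt (json_in : List (String × String)) (seglist : List String) : List (String × String) :=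
  let d := PySem.Dict.ofList json_in
  -- kept = {k: v for k, v in json_in.items() if not k.startswith(seglist)}
  let kept := d.items.filter (fun kv => !(seglist.any (fun p => PySem.Str.startswith kv.1 p)))
  -- json_in.clear(); json_in.update(kept); return json_in
  let d2 := kept.foldl (fun e kv => e.insert kv.1 kv.2) PySem.Dict.empty
  d2.items

-- ===== PRECONDITION & SPEC =====
def Spec_delete_segments (json_in : List (String × String)) (seglist : List String) (out : List (String × String)) : Prop := out = delete_segments_alt json_in seglist
instance (json_in : List (String × String)) (seglist : List String) (out : List (String × String)) : Decidable (Spec_delete_segments json_in seglist out) := by unfold Spec_delete_segments; infer_instance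

-- ===== CLAIM (what is proved, stated in full; the proofs are below) =====
def Claim_equal_delete_segments : Prop := ∀ (json_in : List (String × String)) (seglist : List String), Dom_delete_segments json_in seglist → Spec_delete_segments json_in seglist (delete_segments json_in seglist)

-- ===== LEMMAS AND PROOFS =====

-- the guard is redundant: `if e.contains k then e.erase k else e` is always `e.erase k`
theorem pv_contains_erase (e : PySem.Dict String String) (k : String) :
    (if e.contains k then e.erase k else e) = e.erase k := by
  by_cases h : e.contains k
  · simp [h]
  · simp only [h, if_neg Bool.false_ne_true]
    cases e with | mk items =>
    simp only [PySem.Dict.erase]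
    congr 1
    rw [eq_comm, List.filter_eq_self]
    intro p hp
    simp only [PySem.Dict.contains, List.any_eq_true, not_exists, not_and, Bool.not_eq_true] at h
    simp [h p hp]

-- folding erase over a list of keys filters the items by non-membership of the key
theorem pv_foldl_erase (ks : List String) (e : PySem.Dict String String) :
    (ks.foldl (fun e k => e.erase k) e).items
      = e.items.filter (fun kv => !(ks.contains kv.1)) := by
  induction ks generalizing e with
  | nil => simp
  | cons k ks ih =>
    simp only [List.foldl_cons, ih]
    cases e with | mk items =>
    simp only [PySem.Dict.erase, List.filter_filter]
    apply List.filter_congr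
    intro kv _
    by_cases hb : kv.1 = k
    · simp [hb]
    · simp [hb]

-- inserting a nodup-keyed item list into the empty dict gives back exactly that list
theorem pv_rebuild (l : List (String × String)) (h : (l.map (·.1)).Nodup) :
    (l.foldl (fun e kv => e.insert kv.1 kv.2) PySem.Dict.empty).items = l := by
  rw [PySem.Dict.items_foldl_insert_fresh l (·.1) (·.2) PySem.Dict.empty
      (by intro a _; simp [PySem.Dict.contains, PySem.Dict.empty]) h]
  simp [PySem.Dict.empty]

-- core equality over an arbitrary dict with nodup keys and an arbitrary key predicate
theorem pv_main (d : PySem.Dict String String) (hnd : d.keys.Nodup) (p : String × String → Bool) :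
    ((d.items.foldl (fun acc kv => if p kv then acc ++ [kv.1] else acc) []).foldl
        (fun e k => if e.contains k then e.erase k else e) d).items
      = ((d.items.filter (fun kv => !p kv)).foldl
          (fun e kv => e.insert kv.1 kv.2) PySem.Dict.empty).items := by
  have hguard : (fun (e : PySem.Dict String String) k => if e.contains k then e.erase k else e)
      = fun e k => e.erase k := funext fun e => funext fun k => pv_contains_erase e k
  have hnd' : (d.items.map (·.1)).Nodup := hnd
  rw [PySem.List.foldl_append_if, hguard, pv_foldl_erase,
      pv_rebuild _ (hnd'.sublist ((List.filter_sublist (l := d.items)).map (·.1)))]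
  simp only [List.nil_append]
  apply List.filter_congr
  intro kv hkv
  congr 1
  by_cases hp : p kv
  · have hm : kv.1 ∈ (d.items.filter p).map (·.1) :=
      List.mem_map_of_mem (List.mem_filter.mpr ⟨hkv, hp⟩)
    rw [hp, List.contains_iff_mem]
    exact hm
  · rw [Bool.not_eq_true] at hp
    rw [hp, Bool.eq_false_iff, Ne, List.contains_iff_mem]
    intro hc
    obtain ⟨kv', hkv', heq⟩ := List.mem_map.mp hc
    obtain ⟨hmem', hp'⟩ := List.mem_filter.mp hkv'
    have hkk : kv' = kv := List.inj_on_of_nodup_map hnd' hmem' hkv heq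
    rw [hkk, hp] at hp'
    exact Bool.false_ne_true hp'

-- ===== VERDICT (by name: the statement is the Claim_ definition above) =====
theorem delete_segments_spec : Claim_equal_delete_segments := by
  intro json_in seglist _
  unfold Spec_delete_segments delete_segments delete_segments_alt
  exact (pv_main (PySem.Dict.ofList json_in) (PySem.Dict.nodup_keys_ofList json_in)
    (fun kv => pvStartsAnyA kv.1 seglist))
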